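-- pv_equiv track=rewrite | github.com/phuong27102000/NTRU_HRSS_KEM_SV | Draft_Phuong/ternary/poly.py | r2
-- ===== SOURCE A (Python) =====
-- def r2(m,n):
--     out = m.copy()
--     k = len(out)
--     while k>n:
--         out[k-1-n] += out.pop()
--         k-=1
--     while k<n:
--         out += [0]
--         k+=1
--     for i in range(0,n):
--         out[i] &= 1
--     return out
-- ===== SOURCE B (Python) =====
-- def r2(m, n):
--     out = [0] * n
--     for i, x in enumerate(m):
--         out[i % n] += x
--     return [x & 1 for x in out]
-- ===== Notes on version B (the rewrite author's own statement) =====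
-- stated objective: simpler
-- what changed: B replaces A's in-place pop-and-fold from the top (repeatedly out[k-1-n] += out.pop()) by a single forward pass that accumulates each coefficient into a fixed n-bucket table out[i % n] += m[i], then masks with a comprehension.
import Mathlib
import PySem

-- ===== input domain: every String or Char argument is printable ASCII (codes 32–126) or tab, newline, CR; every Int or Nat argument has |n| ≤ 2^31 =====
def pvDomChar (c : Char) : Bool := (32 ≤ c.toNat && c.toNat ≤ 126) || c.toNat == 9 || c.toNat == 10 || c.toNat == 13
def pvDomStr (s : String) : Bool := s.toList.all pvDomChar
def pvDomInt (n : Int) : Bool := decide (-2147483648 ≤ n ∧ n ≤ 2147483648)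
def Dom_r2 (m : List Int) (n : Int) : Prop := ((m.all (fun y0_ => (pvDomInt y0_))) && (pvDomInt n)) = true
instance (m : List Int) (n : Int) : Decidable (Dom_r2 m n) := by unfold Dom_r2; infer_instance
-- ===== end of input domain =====

-- B reduces mod x^n-1 by one forward pass into an n-bucket table (out[i % n] += m[i]) instead of
-- A's repeated pop-and-fold from the top; objective: simpler.

-- ===== PORT A =====
-- while k>n: out[k-1-n] += out.pop(); k-=1   (pop of [] raises IndexError: excluded by Pre_;
-- inside the loop k-1-n > -1, so the index is nonnegative and toNat is exact)
def r2Loop1Go (fuel : Nat) (out : List Int) (n : Int) : List Int :=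
  match fuel with
  | 0 => out
  | fuel + 1 =>
    if (out.length : Int) > n then
      match out.getLast? with
      | none => out   -- Python raises IndexError here (outside Pre_)
      | some t =>
        r2Loop1Go fuel (out.dropLast.set ((out.length : Int) - 1 - n).toNat
          (out.dropLast.getD ((out.length : Int) - 1 - n).toNat 0 + t)) n
    else out

-- fuel = initial length: each iteration shortens out by one, so this runs A's loop to completion
def r2Loop1 (out : List Int) (n : Int) : List Int := r2Loop1Go out.length out n

-- while k<n: out += [0]; k+=1
def r2Loop2Go (fuel : Nat) (out : List Int) (n : Int) : List Int :=
  match fuel with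
  | 0 => out
  | fuel + 1 =>
    if (out.length : Int) < n then r2Loop2Go fuel (out ++ [0]) n else out

-- fuel = n - len(out): each iteration appends one zero, so this runs A's loop to completion
def r2Loop2 (out : List Int) (n : Int) : List Int := r2Loop2Go (n - out.length).toNat out n

-- for i in range(0,n): out[i] &= 1   (x & 1 = x mod 2 exactly for Python ints; i ≥ 0 in the range)
def r2 (m : List Int) (n : Int) : List Int :=
  let out := r2Loop2 (r2Loop1 m n) n
  (PySem.List.pyRange 0 n 1).foldl
    (fun o i => o.set i.toNat (PySem.Int.mod (o.getD i.toNat 0) 2)) out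

-- ===== PORT B =====
def r2_alt (m : List Int) (n : Int) : List Int :=
  let out0 := List.replicate n.toNat 0   -- [0]*n ([] for n ≤ 0, as in Python)
  let out := (PySem.List.enumerate m 0).foldl
    (fun o ix => o.set (PySem.Int.mod ix.1 n).toNat
      (o.getD (PySem.Int.mod ix.1 n).toNat 0 + ix.2)) out0   -- out[i % n] += x
  out.map (fun x => PySem.Int.mod x 2)   -- x & 1 = x mod 2, exact

-- ===== PRECONDITION & SPEC =====
-- Pre_ excludes exactly the inputs where A raises IndexError: n < 0, or n = 0 with nonempty m.
def Pre_r2 (m : List Int) (n : Int) : Prop := 0 < n ∨ (n = 0 ∧ m = [])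
instance (m : List Int) (n : Int) : Decidable (Pre_r2 m n) := by unfold Pre_r2; infer_instance
def pvWitness_r2 : List Int × Int := ([1, 2, 3], 2)

def Spec_r2 (m : List Int) (n : Int) (out : List Int) : Prop := out = r2_alt m n
instance (m : List Int) (n : Int) (out : List Int) : Decidable (Spec_r2 m n out) := by unfold Spec_r2; infer_instance

-- ===== CLAIM (what is proved, stated in full; the proofs are below) =====
def Claim_equal_r2 : Prop := ∀ (m : List Int) (n : Int), Dom_r2 m n → Pre_r2 m n → Spec_r2 m n (r2 m n)

-- ===== LEMMAS AND PROOFS =====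

-- "o[p] += x" as one operation (out-of-range p: no-op, like List.set)
def addB (o : List Int) (p : Nat) (x : Int) : List Int := o.set p (o.getD p 0 + x)

-- accumulate the elements of a list into residue buckets mod N, starting at index s
def bkAux (N : Nat) (o : List Int) (s : Nat) : List Int → List Int
  | [] => o
  | x :: xs => bkAux N (addB o (s % N) x) (s + 1) xs

theorem addB_length (o : List Int) (p : Nat) (x : Int) : (addB o p x).length = o.length := by
  simp [addB]

theorem addB_add (o : List Int) (i : Nat) (x y : Int) :
    addB o i (x + y) = addB (addB o i x) i y := by
  unfold addB
  by_cases h : i < o.length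
  · simp [List.getD, h]
    ring_nf
  · simp [List.set_eq_of_length_le (by omega : o.length ≤ i)]

theorem addB_comm (o : List Int) (i j : Nat) (x y : Int) :
    addB (addB o i x) j y = addB (addB o j y) i x := by
  by_cases hij : i = j
  · subst hij
    rw [← addB_add, ← addB_add]; ring_nf
  · unfold addB
    simp [List.getD, List.getElem?_set_ne (by omega : i ≠ j), List.getElem?_set_ne (by omega : j ≠ i)]
    exact List.set_comm _ _ hij

theorem bkAux_length (N : Nat) (l : List Int) (o : List Int) (s : Nat) :
    (bkAux N o s l).length = o.length := by
  induction l generalizing o s with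
  | nil => rfl
  | cons a as ih => simp only [bkAux, ih, addB_length]

theorem bkAux_addB_out (N : Nat) (l : List Int) (o : List Int) (s p : Nat) (x : Int) :
    bkAux N (addB o p x) s l = addB (bkAux N o s l) p x := by
  induction l generalizing o s with
  | nil => rfl
  | cons a as ih => simp only [bkAux]; rw [addB_comm o p (s % N), ih]

theorem bkAux_append_one (N : Nat) (l : List Int) (o : List Int) (s : Nat) (t : Int) :
    bkAux N o s (l ++ [t]) = addB (bkAux N o s l) ((s + l.length) % N) t := by
  induction l generalizing o s with
  | nil => simp [bkAux]
  | cons a as ih => simp only [List.cons_append, bkAux, ih, List.length_cons]; ring_nf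

theorem bkAux_update (N : Nat) (l : List Int) (o : List Int) (s p : Nat) (t : Int)
    (hp : p < l.length) :
    bkAux N o s (addB l p t) = addB (bkAux N o s l) ((s + p) % N) t := by
  induction l generalizing o s p with
  | nil => simp at hp
  | cons a as ih =>
    cases p with
    | zero =>
      have h1 : addB (a :: as) 0 t = (a + t) :: as := by simp [addB]
      rw [h1]
      simp only [bkAux]
      rw [addB_add, bkAux_addB_out]
      norm_num
    | succ q =>
      have h1 : addB (a :: as) (q + 1) t = a :: addB as q t := by simp [addB]
      rw [h1]
      simp only [bkAux]
      rw [ih _ _ _ (by simpa using hp)]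
      congr 2
      omega

theorem r2Loop1Go_invariant (n : Int) (hn : 0 < n) (z : List Int) :
    ∀ (fuel : Nat) (out : List Int),
      bkAux n.toNat z 0 (r2Loop1Go fuel out n) = bkAux n.toNat z 0 out := by
  intro fuel
  induction fuel with
  | zero => intro out; rfl
  | succ fuel ih =>
    intro out
    rw [r2Loop1Go]
    split
    case isFalse => rfl
    case isTrue h =>
    match hl : out.getLast? with
    | none => rfl
    | some t =>
    rw [ih]
    obtain ⟨l', rfl⟩ := List.getLast?_eq_some_iff.mp hl
    have hN : ((n.toNat : Nat) : Int) = n := Int.toNat_of_nonneg hn.le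
    have hNpos : 0 < n.toNat := by omega
    have hlen : n.toNat ≤ l'.length := by
      have := h; push_cast at this ⊢; simp at this; omega
    have hpe : ((((l' ++ [t]).length : Nat) : Int) - 1 - n).toNat = l'.length - n.toNat := by
      simp; omega
    rw [List.dropLast_concat, hpe]
    have hplt : l'.length - n.toNat < l'.length := by omega
    rw [show l'.set (l'.length - n.toNat) (l'.getD (l'.length - n.toNat) 0 + t)
          = addB l' (l'.length - n.toNat) t from rfl]
    rw [bkAux_update n.toNat l' z 0 (l'.length - n.toNat) t hplt, bkAux_append_one]
    congr 1
    conv_rhs => rw [show l'.length = (l'.length - n.toNat) + n.toNat from by omega]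
    simp only [Nat.zero_add, Nat.add_mod_right]

theorem r2Loop1_invariant (n : Int) (hn : 0 < n) (z : List Int) (out : List Int) :
    bkAux n.toNat z 0 (r2Loop1 out n) = bkAux n.toNat z 0 out :=
  r2Loop1Go_invariant n hn z out.length out

theorem r2Loop1Go_len (n : Int) (hn : 0 < n) :
    ∀ (fuel : Nat) (out : List Int), out.length ≤ n.toNat + fuel →
      (r2Loop1Go fuel out n).length ≤ n.toNat := by
  intro fuel
  induction fuel with
  | zero => intro out h; simpa using h
  | succ fuel ih =>
    intro out hle
    rw [r2Loop1Go]
    split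
    case isFalse h => omega
    case isTrue h =>
    match hl : out.getLast? with
    | none =>
      have : out = [] := List.getLast?_eq_none_iff.mp hl
      subst this; simpa using hn.le
    | some t =>
      apply ih
      have : out ≠ [] := by intro hh; subst hh; simp at hl
      have : 0 < out.length := List.length_pos_iff.mpr this
      simp only [List.length_set, List.length_dropLast]
      omega

theorem r2Loop1_len (n : Int) (hn : 0 < n) (out : List Int) :
    (r2Loop1 out n).length ≤ n.toNat :=
  r2Loop1Go_len n hn out.length out (by omega)

theorem r2Loop2Go_pad (n : Int) :
    ∀ (fuel : Nat) (out : List Int), (n - (out.length : Int)).toNat ≤ fuel →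
      r2Loop2Go fuel out n = out ++ List.replicate (n - (out.length : Int)).toNat 0 := by
  intro fuel
  induction fuel with
  | zero =>
    intro out h
    have h2 : (n - (out.length : Int)).toNat = 0 := by omega
    simp [r2Loop2Go, h2]
  | succ fuel ih =>
    intro out hle
    rw [r2Loop2Go]
    split
    case isFalse h =>
      have h2 : (n - (out.length : Int)).toNat = 0 := by omega
      simp [h2]
    case isTrue h =>
    rw [ih (out ++ [0]) (by simp; omega)]
    have h1 : ((out ++ [(0:Int)]).length : Int) = (out.length : Int) + 1 := by simp
    rw [h1]
    have h2 : (n - (out.length : Int)).toNat = (n - ((out.length : Int) + 1)).toNat + 1 := by omega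
    rw [h2, List.append_assoc]
    congr 1

theorem r2Loop2_pad (n : Int) (out : List Int) :
    r2Loop2 out n = out ++ List.replicate (n - (out.length : Int)).toNat 0 :=
  r2Loop2Go_pad n (n - (out.length : Int)).toNat out (le_refl _)

theorem bk_short (N : Nat) (l : List Int) (hl : l.length ≤ N) :
    bkAux N (List.replicate N 0) 0 l = l ++ List.replicate (N - l.length) 0 := by
  induction l using List.reverseRecOn with
  | nil => simp [bkAux]
  | append_singleton l t ih =>
    have hlen : l.length + 1 ≤ N := by simpa using hl
    rw [bkAux_append_one, ih (by omega)]
    have hmod : (0 + l.length) % N = l.length := by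
      rw [Nat.zero_add, Nat.mod_eq_of_lt (by omega)]
    rw [hmod]
    unfold addB
    have hrep : List.replicate (N - l.length) (0:Int) = 0 :: List.replicate (N - (l.length + 1)) 0 := by
      rw [show N - l.length = (N - (l.length + 1)) + 1 from by omega, List.replicate_succ]
    have hget : (l ++ List.replicate (N - l.length) (0:Int)).getD l.length 0 = 0 := by
      rw [hrep]
      simp [List.getD, List.getElem?_append_right (le_refl l.length)]
    rw [hget, hrep]
    rw [List.set_append_right _ _ (le_refl l.length)]
    simp
theorem mask_range (f : Int → Int) :
    ∀ (k : Nat) (l : List Int), k ≤ l.length →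
      (List.range k).foldl (fun o i => o.set i (f (o.getD i 0))) l
        = (l.take k).map f ++ l.drop k := by
  intro k
  induction k with
  | zero => intro l h; simp
  | succ k ih =>
    intro l h
    rw [List.range_succ, List.foldl_append, ih l (by omega)]
    simp only [List.foldl_cons, List.foldl_nil]
    have hk : k < l.length := by omega
    have hlen : ((l.take k).map f).length = k := by simp; omega
    have hdrop : l.drop k = l[k] :: l.drop (k + 1) := by
      rw [List.getElem_cons_drop hk]
    have hget : ((l.take k).map f ++ l.drop k).getD k 0 = l[k] := by
      unfold List.getD
      rw [List.getElem?_append_right (by omega : ((l.take k).map f).length ≤ k), hlen,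
        Nat.sub_self, hdrop]
      rfl
    rw [hget, hdrop]
    rw [show ((l.take k).map f ++ l[k] :: l.drop (k + 1)).set k (f l[k])
          = (l.take k).map f ++ (l[k] :: l.drop (k + 1)).set (k - ((l.take k).map f).length) (f l[k])
        from List.set_append_right _ _ (by omega)]
    rw [hlen]
    simp only [Nat.sub_self, List.set_cons_zero]
    have htake : l.take (k + 1) = l.take k ++ [l[k]] := by
      rw [List.take_succ]
      simp [List.getElem?_eq_getElem hk]
    rw [htake, List.map_append, List.append_assoc]
    simp

theorem enum_fold (n : Int) (hn : 0 < n) :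
    ∀ (l : List Int) (o : List Int) (s : Nat),
      (PySem.List.enumerate l (s : Int)).foldl
        (fun o ix => o.set (PySem.Int.mod ix.1 n).toNat
          (o.getD (PySem.Int.mod ix.1 n).toNat 0 + ix.2)) o = bkAux n.toNat o s l := by
  intro l
  induction l with
  | nil => intro o s; simp [PySem.List.enumerate_nil, bkAux]
  | cons a as ih =>
    intro o s
    rw [PySem.List.enumerate_cons]
    simp only [List.foldl_cons]
    have hN : ((n.toNat : Nat) : Int) = n := Int.toNat_of_nonneg hn.le
    have h2 : (PySem.Int.mod (s : Int) n).toNat = s % n.toNat := by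
      conv_lhs => rw [← hN]
      rw [PySem.Int.mod_natCast, Int.toNat_natCast]
    have h1 : ((s : Int)) + 1 = (((s + 1 : Nat)) : Int) := by push_cast; ring
    rw [h1, ih, h2]
    rfl

-- ===== VERDICT (by name: the statement is the Claim_ definition above) =====
theorem r2_spec : Claim_equal_r2 := by
  unfold Claim_equal_r2
  intro m n _ hpre
  unfold Spec_r2
  rcases hpre with hn | ⟨hn0, hm⟩
  · have hN : ((n.toNat : Nat) : Int) = n := Int.toNat_of_nonneg hn.le
    have hNpos : 0 < n.toNat := by omega
    simp only [r2, r2_alt]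
    rw [r2Loop2_pad n _]
    have hr : (r2Loop1 m n).length ≤ n.toNat := r2Loop1_len n hn m
    have hcast : (n - ((r2Loop1 m n).length : Int)).toNat = n.toNat - (r2Loop1 m n).length := by
      omega
    rw [hcast, ← bk_short n.toNat (r2Loop1 m n) hr, r2Loop1_invariant n hn _ m]
    have hLlen : (bkAux n.toNat (List.replicate n.toNat 0) 0 m).length = n.toNat := by
      rw [bkAux_length]; simp
    -- mask loop = map (· mod 2)
    rw [PySem.List.pyRange_one]
    have hn0 : ((n : Int) - 0).toNat = n.toNat := by omega
    rw [hn0, List.foldl_map]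
    simp only [zero_add, Int.toNat_natCast]
    rw [mask_range (fun x => PySem.Int.mod x 2) n.toNat _ (le_of_eq hLlen.symm)]
    have he := enum_fold n hn m (List.replicate n.toNat 0) 0
    rw [Nat.cast_zero] at he
    rw [he]
    rw [List.take_of_length_le (le_of_eq hLlen), List.drop_eq_nil_of_le (le_of_eq hLlen)]
    simp
  · subst hn0; subst hm
    simp [r2, r2_alt, r2Loop1, r2Loop1Go, r2Loop2, r2Loop2Go, PySem.List.pyRange_one_eq_nil, PySem.List.enumerate_nil]
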